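-- pv_equiv track=rewrite | github.com/gabriellaec/desoft-analise-exercicios | backup/user_185/ch74_2019_09_18_14_17_31_044722.py | conta_biagramas
-- ===== SOURCE A (Python) =====
-- def conta_biagramas(string):
--     soma_1 = 0
--     soma_2 = 0
--     soma_3 = 0
--     soma_4 = 0
--     soma_5 = 0
--     soma_6 = 0
--     soma_7 = 0
--     soma_8 = 0
--     i = 1
--     dicio = {}
--     while i < len(string):
--         string_2 = string[i-1] + string[i]
--         if string_2 == 'ba' :
--             soma_1 = soma_1 + 1
--         elif string_2 == 'an' :
--             soma_2 = soma_2 + 1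
--         elif string_2 == 'na':
--             soma_3 = soma_3 + 1
--         elif string_2 == 'a ':
--             soma_4 = soma_4 + 1
--         elif string_2 == ' n':
--             soma_5 = soma_5 + 1
--         elif string_2 == 'ni':
--             soma_6 = soma_6 + 1
--         elif string_2 == 'ca':
--             soma_7 = soma_7 + 1
--         dicio['ba'] = soma_1
--         dicio['an'] = soma_2
--         dicio['na'] = soma_3
--         dicio['a '] = soma_4
--         dicio[' n'] = soma_5
--         dicio['ni'] = soma_6
--         dicio['ca'] = soma_7
--         i = i + 1
--     return dicio
-- ===== SOURCE B (Python) =====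
-- def conta_biagramas(string):
--     if len(string) < 2:
--         return {}
--     bigrams = [string[i:i+2] for i in range(len(string)-1)]
--     return {b: bigrams.count(b) for b in ['ba', 'an', 'na', 'a ', ' n', 'ni', 'ca']}
-- ===== Notes on version B (the rewrite author's own statement) =====
-- stated objective: idiomatic
-- what changed: Replaces the manual positional while-loop with seven counters, an elif chain and a dict rewritten every iteration by a bigram-slice list plus a dict comprehension counting each of the seven bigrams with list.count.
import Mathlib
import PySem

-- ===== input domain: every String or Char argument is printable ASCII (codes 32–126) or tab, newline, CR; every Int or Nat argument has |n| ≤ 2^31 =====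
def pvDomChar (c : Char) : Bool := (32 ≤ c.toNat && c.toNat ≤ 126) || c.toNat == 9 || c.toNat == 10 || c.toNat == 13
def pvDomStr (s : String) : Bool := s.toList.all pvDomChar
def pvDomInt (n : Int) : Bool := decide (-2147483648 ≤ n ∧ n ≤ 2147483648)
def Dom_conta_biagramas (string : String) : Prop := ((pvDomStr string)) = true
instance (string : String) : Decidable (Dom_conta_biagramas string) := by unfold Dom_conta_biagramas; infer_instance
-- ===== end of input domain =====

-- B replaces A's positional while-loop (seven counters, elif chain, dict rewritten each
-- iteration) by a bigram-slice list plus per-bigram list.count lookups (idiomatic; the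
-- timing run measured B faster by a constant factor).


set_option maxHeartbeats 1000000

-- ===== PORT A =====
-- one iteration of A's while loop; string indexing via pyGetD (every loop index 1 ≤ i < len is in range)
def pvStepA (cs : List Char)
    (st : (Int × Int × Int × Int × Int × Int × Int) × PySem.Dict String Int) (i : Int) :
    (Int × Int × Int × Int × Int × Int × Int) × PySem.Dict String Int :=
  match st with
  | ((s1, s2, s3, s4, s5, s6, s7), d) =>
    let string_2 : List Char := [PySem.List.pyGetD cs (i - 1) ' ', PySem.List.pyGetD cs i ' ']
    let (s1, s2, s3, s4, s5, s6, s7) :=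
      if string_2 = ['b', 'a'] then (s1 + 1, s2, s3, s4, s5, s6, s7)
      else if string_2 = ['a', 'n'] then (s1, s2 + 1, s3, s4, s5, s6, s7)
      else if string_2 = ['n', 'a'] then (s1, s2, s3 + 1, s4, s5, s6, s7)
      else if string_2 = ['a', ' '] then (s1, s2, s3, s4 + 1, s5, s6, s7)
      else if string_2 = [' ', 'n'] then (s1, s2, s3, s4, s5 + 1, s6, s7)
      else if string_2 = ['n', 'i'] then (s1, s2, s3, s4, s5, s6 + 1, s7)
      else if string_2 = ['c', 'a'] then (s1, s2, s3, s4, s5, s6, s7 + 1)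
      else (s1, s2, s3, s4, s5, s6, s7)
    let d := ((((((d.insert "ba" s1).insert "an" s2).insert "na" s3).insert "a " s4).insert " n" s5).insert "ni" s6).insert "ca" s7
    ((s1, s2, s3, s4, s5, s6, s7), d)

def conta_biagramas (string : String) : List (String × Int) :=
  let cs := string.toList
  ((PySem.List.pyRange 1 (PySem.Str.len string) 1).foldl (pvStepA cs)
    ((0, 0, 0, 0, 0, 0, 0), PySem.Dict.empty)).2.items

-- ===== PORT B =====
def conta_biagramas_alt (string : String) : List (String × Int) :=
  if PySem.Str.len string < 2 then (PySem.Dict.empty : PySem.Dict String Int).items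
  else
    let bigrams := (PySem.List.pyRange 0 (PySem.Str.len string - 1) 1).map
      (fun i => PySem.Str.slice string (some i) (some (i + 2)))
    (["ba", "an", "na", "a ", " n", "ni", "ca"].foldl
      (fun d b => d.insert b ((bigrams.count b : Int))) (PySem.Dict.empty : PySem.Dict String Int)).items

-- ===== PRECONDITION & SPEC =====
def Spec_conta_biagramas (string : String) (out : List (String × Int)) : Prop := out = conta_biagramas_alt string
instance (string : String) (out : List (String × Int)) : Decidable (Spec_conta_biagramas string out) := by unfold Spec_conta_biagramas; infer_instance

-- ===== CLAIM (what is proved, stated in full; the proofs are below) =====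
def Claim_equal_conta_biagramas : Prop := ∀ (string : String), Dom_conta_biagramas string → Spec_conta_biagramas string (conta_biagramas string)

-- ===== LEMMAS AND PROOFS =====

-- counter part of one loop iteration of A, on a known adjacent pair
def pvBump : (Int × Int × Int × Int × Int × Int × Int) → (Char × Char) →
    Int × Int × Int × Int × Int × Int × Int
  | (s1, s2, s3, s4, s5, s6, s7), (x, y) =>
    let string_2 : List Char := [x, y]
    if string_2 = ['b', 'a'] then (s1 + 1, s2, s3, s4, s5, s6, s7)
    else if string_2 = ['a', 'n'] then (s1, s2 + 1, s3, s4, s5, s6, s7)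
    else if string_2 = ['n', 'a'] then (s1, s2, s3 + 1, s4, s5, s6, s7)
    else if string_2 = ['a', ' '] then (s1, s2, s3, s4 + 1, s5, s6, s7)
    else if string_2 = [' ', 'n'] then (s1, s2, s3, s4, s5 + 1, s6, s7)
    else if string_2 = ['n', 'i'] then (s1, s2, s3, s4, s5, s6 + 1, s7)
    else if string_2 = ['c', 'a'] then (s1, s2, s3, s4, s5, s6, s7 + 1)
    else (s1, s2, s3, s4, s5, s6, s7)

-- the seven dict assignments of one loop iteration of A
def pvIns7' (d : PySem.Dict String Int) (v : Int × Int × Int × Int × Int × Int × Int) :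
    PySem.Dict String Int :=
  ((((((d.insert "ba" v.1).insert "an" v.2.1).insert "na" v.2.2.1).insert "a " v.2.2.2.1).insert " n" v.2.2.2.2.1).insert "ni" v.2.2.2.2.2.1).insert "ca" v.2.2.2.2.2.2

def pvIns7 (v : Int × Int × Int × Int × Int × Int × Int) : PySem.Dict String Int :=
  pvIns7' PySem.Dict.empty v

-- A's loop body rephrased on the adjacent pair it actually reads
def pvPairStep (st : (Int × Int × Int × Int × Int × Int × Int) × PySem.Dict String Int)
    (p : Char × Char) :
    (Int × Int × Int × Int × Int × Int × Int) × PySem.Dict String Int :=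
  let s' := pvBump st.1 p
  (s', pvIns7' st.2 s')

lemma pvStepA_eq (cs : List Char) (st : (Int × Int × Int × Int × Int × Int × Int) × PySem.Dict String Int)
    (k : Nat) (hk : k + 1 < cs.length) :
    pvStepA cs st ((k : Int) + 1) = pvPairStep st (cs[k], cs[k + 1]) := by
  obtain ⟨⟨s1, s2, s3, s4, s5, s6, s7⟩, d⟩ := st
  have h1 : ((k : Int) + 1 - 1) = (k : Int) := by omega
  simp only [pvStepA, pvPairStep, pvBump, pvIns7', h1]
  have h2 : ((k : Int) + 1) = ((k + 1 : Nat) : Int) := by omega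
  rw [h2, PySem.List.pyGetD_natCast, PySem.List.pyGetD_natCast,
    List.getD_eq_getElem _ _ (by omega : k < cs.length), List.getD_eq_getElem _ _ hk]

lemma pvIns7'_pvIns7 (x y : Int × Int × Int × Int × Int × Int × Int) :
    pvIns7' (pvIns7 x) y = pvIns7 y := by
  obtain ⟨x1, x2, x3, x4, x5, x6, x7⟩ := x
  obtain ⟨y1, y2, y3, y4, y5, y6, y7⟩ := y
  simp [pvIns7, pvIns7', PySem.Dict.insert, PySem.Dict.empty]

lemma pvFoldRange (cs : List Char) :
    ∀ (n k : Nat) (st : (Int × Int × Int × Int × Int × Int × Int) × PySem.Dict String Int),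
      cs.length ≤ k + n →
      (PySem.List.pyRange ((k : Int) + 1) (cs.length : Int) 1).foldl (pvStepA cs) st =
        ((cs.drop k).zip (cs.drop (k + 1))).foldl pvPairStep st := by
  intro n
  induction n with
  | zero =>
    intro k st h
    rw [PySem.List.pyRange_one_eq_nil (by omega)]
    have : cs.drop (k + 1) = [] := List.drop_eq_nil_of_le (by omega)
    simp [this]
  | succ m ih =>
    intro k st h
    by_cases hk : k + 1 < cs.length
    · rw [PySem.List.pyRange_one_cons (by omega : (k : Int) + 1 < (cs.length : Int))]
      have hd1 : cs.drop k = cs[k] :: cs.drop (k + 1) :=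
        List.drop_eq_getElem_cons (by omega)
      have hd2 : cs.drop (k + 1) = cs[k + 1] :: cs.drop (k + 2) :=
        List.drop_eq_getElem_cons hk
      rw [hd1, hd2, List.zip_cons_cons, List.foldl_cons, List.foldl_cons,
        pvStepA_eq cs st k hk]
      have : ((k : Int) + 1 + 1) = ((k + 1 : Nat) : Int) + 1 := by omega
      rw [this, ih (k + 1) _ (by omega), ← hd2]
    · rw [PySem.List.pyRange_one_eq_nil (by omega)]
      have : cs.drop (k + 1) = [] := List.drop_eq_nil_of_le (by omega)
      simp [this]

lemma pvFoldBump (ps : List (Char × Char)) :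
    ∀ (s : Int × Int × Int × Int × Int × Int × Int),
      ps.foldl pvBump s =
        (s.1 + ps.count ('b', 'a'), s.2.1 + ps.count ('a', 'n'), s.2.2.1 + ps.count ('n', 'a'),
         s.2.2.2.1 + ps.count ('a', ' '), s.2.2.2.2.1 + ps.count (' ', 'n'),
         s.2.2.2.2.2.1 + ps.count ('n', 'i'), s.2.2.2.2.2.2 + ps.count ('c', 'a')) := by
  induction ps with
  | nil => intro s; simp
  | cons p t ih =>
    intro s
    obtain ⟨s1, s2, s3, s4, s5, s6, s7⟩ := s
    obtain ⟨x, y⟩ := p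
    rw [List.foldl_cons, ih]
    simp only [pvBump, List.count_cons, beq_iff_eq, Prod.mk.injEq, List.cons.injEq, and_true]
    split_ifs <;> simp_all <;> omega

lemma pvFoldPair (ps : List (Char × Char)) :
    ∀ (s x : Int × Int × Int × Int × Int × Int × Int),
      ps.foldl pvPairStep (s, pvIns7 x) =
        (ps.foldl pvBump s, pvIns7 (if ps = [] then x else ps.foldl pvBump s)) := by
  induction ps with
  | nil => intro s x; simp
  | cons p t ih =>
    intro s x
    rw [List.foldl_cons]
    show t.foldl pvPairStep (pvBump s p, pvIns7' (pvIns7 x) (pvBump s p)) = _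
    rw [pvIns7'_pvIns7, ih]
    rcases t with _ | ⟨q, u⟩ <;> simp

lemma pvBigrams_eq (string : String) (h : 2 ≤ string.toList.length) :
    (PySem.List.pyRange 0 (PySem.Str.len string - 1) 1).map
      (fun i => PySem.Str.slice string (some i) (some (i + 2))) =
      (string.toList.zip string.toList.tail).map (fun p => String.ofList [p.1, p.2]) := by
  have hL : string.toList.length = string.length := String.length_toList
  apply List.ext_getElem
  · simp [PySem.List.length_pyRange_one, List.length_zip]
  · intro k h1 h2
    have hk : k < string.toList.length - 1 := by
      simpa [List.length_zip] using h2
    rw [List.getElem_map, List.getElem_map, PySem.List.getElem_pyRange_one]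
    rw [List.getElem_zip]
    have htl : string.toList.tail[k]'(by simp [List.length_tail]; omega) =
        string.toList[k + 1]'(by omega) := by
      simp [List.getElem_tail]
    rw [htl]
    have h0 : (0 : Int) + (k : Int) = ((k : Nat) : Int) := by omega
    rw [h0]
    apply String.ext
    show (PySem.Str.slice string (some (k : Int)) (some ((k : Int) + 2))).toList = _
    have h2' : ((k : Int) + 2) = ((k + 2 : Nat) : Int) := by omega
    rw [h2']
    simp only [PySem.Str.toList_slice, PySem.Chars.slice_eq_listSlice, PySem.List.slice_natCast]
    have hd : string.toList.drop k =
        string.toList[k]'(by omega) :: string.toList[k + 1]'(by omega) :: string.toList.drop (k + 2) := by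
      rw [List.drop_eq_getElem_cons (by omega), List.drop_eq_getElem_cons (by omega)]
    rw [String.toList_ofList]
    conv_lhs => rw [hd]
    have ht : k + 2 - k = 2 := by omega
    rw [ht]
    rfl

lemma pvMkPair_injective : Function.Injective (fun p : Char × Char => String.ofList [p.1, p.2]) := by
  intro ⟨a, b⟩ ⟨c, d⟩ h
  simp only at h
  have hl := congrArg String.toList h
  simp only [String.toList_ofList, List.cons.injEq, and_true] at hl
  obtain ⟨hac, hbd⟩ := hl
  subst hac; subst hbd; rfl

theorem conta_biagramas_spec_aux (string : String) :
    conta_biagramas string = conta_biagramas_alt string := by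
  have hL : string.toList.length = string.length := String.length_toList
  by_cases h2 : string.toList.length < 2
  · -- fewer than two characters: the loop never runs, both return the empty dict
    unfold conta_biagramas conta_biagramas_alt
    rw [PySem.List.pyRange_one_eq_nil (by simp; omega)]
    rw [if_pos (by simp; omega)]
    rfl
  · rw [not_lt] at h2
    have hlen : PySem.Str.len string = (string.toList.length : Int) := by rw [hL]; simp
    -- A's side: the loop is a fold over the adjacent pairs of the string
    have hA : conta_biagramas string =
        (pvIns7 ((string.toList.zip string.toList.tail).foldl pvBump (0, 0, 0, 0, 0, 0, 0))).items := by
      show ((PySem.List.pyRange 1 (PySem.Str.len string) 1).foldl (pvStepA string.toList)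
        ((0, 0, 0, 0, 0, 0, 0), PySem.Dict.empty)).2.items = _
      rw [hlen]
      have hfr := pvFoldRange string.toList string.toList.length 0
        ((0, 0, 0, 0, 0, 0, 0), PySem.Dict.empty) (by omega)
      norm_num [List.drop_one] at hfr
      rw [hL, hfr]
      rcases hps' : string.toList.zip string.toList.tail with _ | ⟨p, t⟩
      · exfalso
        have := congrArg List.length hps'
        simp [List.length_zip, List.length_tail] at this
        omega
      · rw [List.foldl_cons]
        show ((t.foldl pvPairStep (pvBump (0,0,0,0,0,0,0) p, pvIns7' PySem.Dict.empty (pvBump (0,0,0,0,0,0,0) p)))).2.items = _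
        rw [show pvIns7' PySem.Dict.empty (pvBump (0,0,0,0,0,0,0) p) = pvIns7 (pvBump (0,0,0,0,0,0,0) p) from rfl]
        rw [pvFoldPair]
        rcases t with _ | ⟨q, u⟩ <;> simp
    rw [hA, pvFoldBump]
    -- B's side
    have hB : conta_biagramas_alt string =
        (["ba", "an", "na", "a ", " n", "ni", "ca"].foldl
          (fun d b => d.insert b ((((PySem.List.pyRange 0 (PySem.Str.len string - 1) 1).map
            (fun i => PySem.Str.slice string (some i) (some (i + 2)))).count b : Int)))
          (PySem.Dict.empty : PySem.Dict String Int)).items := by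
      unfold conta_biagramas_alt
      rw [if_neg (by rw [hlen]; omega)]
    rw [hB]
    rw [pvBigrams_eq string h2]
    have hcnt : ∀ a b : Char,
        ((string.toList.zip string.toList.tail).map (fun p => String.ofList [p.1, p.2])).count
            (String.ofList [a, b]) =
          (string.toList.zip string.toList.tail).count (a, b) :=
      fun a b => List.count_map_of_injective _ _ pvMkPair_injective (a, b)
    have e1 := hcnt 'b' 'a'; have e2 := hcnt 'a' 'n'; have e3 := hcnt 'n' 'a'
    have e4 := hcnt 'a' ' '; have e5 := hcnt ' ' 'n'; have e6 := hcnt 'n' 'i'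
    have e7 := hcnt 'c' 'a'
    simp only [List.foldl_cons, List.foldl_nil]
    simp only [show ("ba" : String) = String.ofList ['b', 'a'] from rfl,
      show ("an" : String) = String.ofList ['a', 'n'] from rfl,
      show ("na" : String) = String.ofList ['n', 'a'] from rfl,
      show ("a " : String) = String.ofList ['a', ' '] from rfl,
      show (" n" : String) = String.ofList [' ', 'n'] from rfl,
      show ("ni" : String) = String.ofList ['n', 'i'] from rfl,
      show ("ca" : String) = String.ofList ['c', 'a'] from rfl]
    rw [e1, e2, e3, e4, e5, e6, e7]
    simp [pvIns7, pvIns7', PySem.Dict.insert, PySem.Dict.empty]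

-- ===== VERDICT (by name: the statement is the Claim_ definition above) =====
theorem conta_biagramas_spec : Claim_equal_conta_biagramas := by
  intro string _
  unfold Spec_conta_biagramas
  exact conta_biagramas_spec_aux string
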